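-- pv_equiv track=rewrite | github.com/changhooni/ai-codyssey-team | Team/Yonghyeon/map_direct_save.py | find_overlapping_segments
-- ===== SOURCE A (Python) =====
-- def find_overlapping_segments(path1, path2):
--
--     if not path1 or not path2:
--         return set()
--
--     # 경로를 선분으로 변환
--     segments1 = set()
--     segments2 = set()
--
--     # 선분을 정규화하여 작은 좌표가 먼저 오도록 함
--     for i in range(len(path1) - 1):
--         p1, p2 = path1[i], path1[i + 1]
--         # 선분을 정규화 (작은 좌표가 먼저 오도록)
--         segment = tuple(sorted([p1, p2]))
--         segments1.add(segment)
--
--     # 두 번째 경로의 선분도 정규화하여 저장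
--     for i in range(len(path2) - 1):
--         p1, p2 = path2[i], path2[i + 1]
--         segment = tuple(sorted([p1, p2]))
--         segments2.add(segment)
--
--     # 겹치는 선분 찾기
--     overlapping = segments1.intersection(segments2)
--     return overlapping
-- ===== SOURCE B (Python) =====
-- def find_overlapping_segments(path1, path2):
--     if not path1 or not path2:
--         return set()
--     overlapping = set()
--     # direct nested scan: no segment index is built at all
--     for p1, p2 in zip(path1, path1[1:]):
--         seg = (p1, p2) if p1 <= p2 else (p2, p1)
--         for q1, q2 in zip(path2, path2[1:]):
--             if seg == ((q1, q2) if q1 <= q2 else (q2, q1)):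
--                 overlapping.add(seg)
--                 break
--     return overlapping
-- ===== Notes on version B (the rewrite author's own statement) =====
-- stated objective: alternative
-- what changed: B builds no segment set/index at all: for each adjacent pair of path1 it scans path2's adjacent pairs directly and breaks on the first normalized match, collecting matches in the output set; A builds two hash sets and calls set.intersection.
import Mathlib
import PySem

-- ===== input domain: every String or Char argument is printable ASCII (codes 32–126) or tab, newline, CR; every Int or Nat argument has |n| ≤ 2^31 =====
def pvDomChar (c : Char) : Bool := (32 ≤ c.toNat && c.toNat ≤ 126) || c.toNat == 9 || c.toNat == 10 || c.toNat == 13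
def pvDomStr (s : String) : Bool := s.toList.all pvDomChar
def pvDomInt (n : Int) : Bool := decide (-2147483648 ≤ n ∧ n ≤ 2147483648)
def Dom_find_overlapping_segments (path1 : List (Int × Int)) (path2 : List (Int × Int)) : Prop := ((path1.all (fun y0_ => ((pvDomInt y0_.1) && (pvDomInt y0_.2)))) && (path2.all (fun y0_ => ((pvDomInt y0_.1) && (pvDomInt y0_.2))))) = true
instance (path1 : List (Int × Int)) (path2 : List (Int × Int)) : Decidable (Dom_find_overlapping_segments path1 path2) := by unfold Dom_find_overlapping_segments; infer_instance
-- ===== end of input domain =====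

-- B builds no segment index: a direct nested scan of path2's adjacent pairs per path1 segment
-- (break on first match) replaces A's two hash sets and set.intersection (alternative, O(n*m)).

-- ===== PORT A =====
-- tuple(sorted([p, q])): Python sorts 2-element lists of int pairs lexicographically (stable)
def pvNormSeg (p q : Int × Int) : (Int × Int) × (Int × Int) :=
  if p.1 < q.1 ∨ (p.1 = q.1 ∧ p.2 ≤ q.2) then (p, q) else (q, p)

def find_overlapping_segments (path1 : List (Int × Int)) (path2 : List (Int × Int)) : List ((Int × Int) × (Int × Int)) :=
  if path1 = [] ∨ path2 = [] then [] else
  -- for i in range(len(path1)-1): segments1.add(tuple(sorted([path1[i], path1[i+1]])))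
  let segments1 : PySem.Set ((Int × Int) × (Int × Int)) :=
    (PySem.List.pyRange 0 ((path1.length : Int) - 1) 1).foldl
      (fun s i => PySem.Set.add s (pvNormSeg (PySem.List.pyGetD path1 i (0, 0)) (PySem.List.pyGetD path1 (i + 1) (0, 0))))
      PySem.Set.empty
  let segments2 : PySem.Set ((Int × Int) × (Int × Int)) :=
    (PySem.List.pyRange 0 ((path2.length : Int) - 1) 1).foldl
      (fun s i => PySem.Set.add s (pvNormSeg (PySem.List.pyGetD path2 i (0, 0)) (PySem.List.pyGetD path2 (i + 1) (0, 0))))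
      PySem.Set.empty
  PySem.Set.inter segments1 segments2

-- ===== PORT B =====
-- (p, q) if p <= q else (q, p): Python tuple <= is lexicographic
def pvNormSegB (p q : Int × Int) : (Int × Int) × (Int × Int) :=
  if p.1 < q.1 ∨ (p.1 = q.1 ∧ p.2 ≤ q.2) then (p, q) else (q, p)

def find_overlapping_segments_alt (path1 : List (Int × Int)) (path2 : List (Int × Int)) : List ((Int × Int) × (Int × Int)) :=
  if path1 = [] ∨ path2 = [] then [] else
  -- outer loop over zip(path1, path1[1:]); inner scan of zip(path2, path2[1:]) with break = any
  (path1.zip path1.tail).foldl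
    (fun s pq =>
      let seg := pvNormSegB pq.1 pq.2
      if (path2.zip path2.tail).any (fun q => seg == pvNormSegB q.1 q.2)
      then PySem.Set.add s seg else s)
    PySem.Set.empty

-- ===== PRECONDITION & SPEC =====
def Spec_find_overlapping_segments (path1 : List (Int × Int)) (path2 : List (Int × Int)) (out : List ((Int × Int) × (Int × Int))) : Prop := out = find_overlapping_segments_alt path1 path2
instance (path1 : List (Int × Int)) (path2 : List (Int × Int)) (out : List ((Int × Int) × (Int × Int))) : Decidable (Spec_find_overlapping_segments path1 path2 out) := by unfold Spec_find_overlapping_segments; infer_instance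

-- ===== CLAIM (what is proved, stated in full; the proofs are below) =====
def Claim_equal_find_overlapping_segments : Prop := ∀ (path1 : List (Int × Int)) (path2 : List (Int × Int)), Dom_find_overlapping_segments path1 path2 → Spec_find_overlapping_segments path1 path2 (find_overlapping_segments path1 path2)

-- ===== LEMMAS AND PROOFS =====

-- the list of normalized adjacent segments of a path, in order
def pvSegs (xs : List (Int × Int)) : List ((Int × Int) × (Int × Int)) :=
  (xs.zip xs.tail).map (fun pq => pvNormSeg pq.1 pq.2)

-- the index comprehension of A's loops, rewritten as the segment list
theorem pvMap_range_eq_segs (xs : List (Int × Int)) :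
    (PySem.List.pyRange 0 ((xs.length : Int) - 1) 1).map
      (fun i => pvNormSeg (PySem.List.pyGetD xs i (0, 0)) (PySem.List.pyGetD xs (i + 1) (0, 0)))
      = pvSegs xs := by
  rw [PySem.List.pyRange_one]
  rw [List.map_map]
  apply List.ext_getElem
  · simp [pvSegs]
  · intro i h1 h2
    have hi : i < xs.length - 1 := by simp at h1; omega
    have hx1 : (0 : Int) + (i : Int) = ((i : Nat) : Int) := by ring
    have e1 : PySem.List.pyGetD xs ((i : Nat) : Int) (0, 0) = xs[i]'(by omega) := by
      rw [PySem.List.pyGetD_natCast, List.getD_eq_getElem _ _ (by omega)]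
    have e2 : PySem.List.pyGetD xs (((i : Nat) : Int) + 1) (0, 0) = xs[i + 1]'(by omega) := by
      have : ((i : Nat) : Int) + 1 = (((i + 1 : Nat)) : Int) := by push_cast; ring_nf
      rw [this, PySem.List.pyGetD_natCast, List.getD_eq_getElem _ _ (by omega)]
    simp only [List.getElem_map, List.getElem_range, Function.comp_apply, hx1, e1, e2,
      pvSegs, List.getElem_zip, List.getElem_tail]

-- A's index loop builds exactly set(pvSegs xs)
theorem pvLoopA_eq_ofList (xs : List (Int × Int)) :
    (PySem.List.pyRange 0 ((xs.length : Int) - 1) 1).foldl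
      (fun s i => PySem.Set.add s (pvNormSeg (PySem.List.pyGetD xs i (0, 0)) (PySem.List.pyGetD xs (i + 1) (0, 0))))
      PySem.Set.empty = PySem.Set.ofList (pvSegs xs) := by
  rw [← pvMap_range_eq_segs xs, PySem.Set.ofList_eq_foldl, List.foldl_map]
  rfl

theorem pvFoldIf_aux {α : Type} [BEq α] (p : α → Bool) :
    ∀ (l : List α) (s : PySem.Set α),
      l.foldl (fun s x => if p x then PySem.Set.add s x else s) s
        = (l.filter p).foldl PySem.Set.add s := by
  intro l
  induction l with
  | nil => intro s; rfl
  | cons a l ih =>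
    intro s
    by_cases hp : p a = true
    · simp [hp, ih]
    · have hp' : p a = false := by simpa using hp
      simp [hp', ih]

-- filtering-into-a-set = set-of-the-filtered-list
theorem pvFoldIf_eq_ofList_filter {α : Type} [BEq α] (l : List α) (p : α → Bool) :
    l.foldl (fun s x => if p x then PySem.Set.add s x else s) PySem.Set.empty
      = PySem.Set.ofList (l.filter p) := by
  rw [pvFoldIf_aux, PySem.Set.ofList_eq_foldl]
  rfl

theorem pvFilter_add {α : Type} [BEq α] [LawfulBEq α] (s : PySem.Set α) (a : α) (p : α → Bool) :
    (PySem.Set.add s a).filter p = if p a then PySem.Set.add (s.filter p) a else s.filter p := by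
  by_cases hm : a ∈ s
  · by_cases hp : p a = true
    · have hmf : a ∈ s.filter p := List.mem_filter.mpr ⟨hm, hp⟩
      simp [PySem.Set.add, hm, hp, hmf]
    · simp [PySem.Set.add, hm, hp]
  · by_cases hp : p a = true
    · have hmf : a ∉ s.filter p := fun h => hm (List.mem_filter.mp h).1
      simp [PySem.Set.add, hm, hp, hmf, List.filter_append]
    · simp [PySem.Set.add, hm, hp, List.filter_append]

theorem pvFilter_foldl_add {α : Type} [BEq α] [LawfulBEq α] (p : α → Bool) :
    ∀ (l : List α) (s : PySem.Set α),
      (l.foldl PySem.Set.add s).filter p = (l.filter p).foldl PySem.Set.add (s.filter p) := by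
  intro l
  induction l with
  | nil => intro s; rfl
  | cons a l ih =>
    intro s
    by_cases hp : p a = true
    · simp [hp, ih, pvFilter_add]
    · have hp' : p a = false := by simpa using hp
      simp [hp', ih, pvFilter_add]

theorem pvFilter_ofList {α : Type} [BEq α] [LawfulBEq α] (l : List α) (p : α → Bool) :
    (PySem.Set.ofList l).filter p = PySem.Set.ofList (l.filter p) := by
  rw [PySem.Set.ofList_eq_foldl, pvFilter_foldl_add, PySem.Set.ofList_eq_foldl]
  rfl

-- the inner break-scan of B returns true iff the segment is in set(pvSegs path2)
theorem pvAny_eq_contains (path2 : List (Int × Int)) (x : (Int × Int) × (Int × Int)) :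
    ((path2.zip path2.tail).any (fun q => x == pvNormSegB q.1 q.2))
      = PySem.Set.contains (PySem.Set.ofList (pvSegs path2)) x := by
  have h1 : ((path2.zip path2.tail).any (fun q => x == pvNormSegB q.1 q.2)) = true
      ↔ x ∈ pvSegs path2 := by
    simp only [List.any_eq_true, beq_iff_eq, pvSegs, List.mem_map,
      show pvNormSegB = pvNormSeg from rfl]
    constructor
    · rintro ⟨q, hq, e⟩; exact ⟨q, hq, e.symm⟩
    · rintro ⟨q, hq, e⟩; exact ⟨q, hq, e.symm⟩
  have h2 : PySem.Set.contains (PySem.Set.ofList (pvSegs path2)) x = true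
      ↔ x ∈ pvSegs path2 := by
    rw [PySem.Set.contains_iff, PySem.Set.mem_ofList]
  rw [Bool.eq_iff_iff]; rw [h1, h2]

-- ===== VERDICT (by name: the statement is the Claim_ definition above) =====
theorem find_overlapping_segments_spec : Claim_equal_find_overlapping_segments := by
  intro path1 path2 _
  unfold Spec_find_overlapping_segments find_overlapping_segments find_overlapping_segments_alt
  by_cases h : path1 = [] ∨ path2 = []
  · simp [h]
  · simp only [h, if_false, pvLoopA_eq_ofList]
    have hb :
        (path1.zip path1.tail).foldl
          (fun s pq =>
            let seg := pvNormSegB pq.1 pq.2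
            if (path2.zip path2.tail).any (fun q => seg == pvNormSegB q.1 q.2)
            then PySem.Set.add s seg else s)
          PySem.Set.empty
        = PySem.Set.ofList ((pvSegs path1).filter
            (fun x => PySem.Set.contains (PySem.Set.ofList (pvSegs path2)) x)) := by
      simp only [show pvNormSegB = pvNormSeg from rfl]
      have hfold :  (pvSegs path1).foldl
          (fun s x => if (path2.zip path2.tail).any (fun q => x == pvNormSeg q.1 q.2)
            then PySem.Set.add s x else s) PySem.Set.empty
          = PySem.Set.ofList ((pvSegs path1).filter
              (fun x => (path2.zip path2.tail).any (fun q => x == pvNormSeg q.1 q.2))) :=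
        pvFoldIf_eq_ofList_filter _ _
      rw [pvSegs, List.foldl_map] at hfold
      rw [hfold]
      congr 1
      apply List.filter_congr
      intro x _
      exact pvAny_eq_contains path2 x
    rw [hb, ← pvFilter_ofList]
    rfl
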